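-- pv_equiv track=rewrite | github.com/Isabelaodcm/codigos-pds | sinais_elementares.py | impulso
-- ===== SOURCE A (Python) =====
-- def impulso(n):
--     valores = []
--     # for valor in range(2*n+1):
--     for valor in range(-n, n+1):
--         if valor == 0:
--             valores.append(1)
--
--         else:
--             valores.append(0)
--
--     return valores
-- ===== SOURCE B (Python) =====
-- def impulso(n):
--     valores = [0] * (2 * n + 1)
--     if valores:
--         valores[n] = 1
--     return valores
-- ===== Notes on version B (the rewrite author's own statement) =====
-- stated objective: simpler
-- what changed: Replaces the per-element branching loop over range(-n, n+1) with a single zero-list allocation [0]*(2n+1) plus one indexed assignment at the center, which a timing run also measured as a constant-factor speedup (no per-element interpreted branch/append).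
import Mathlib
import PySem

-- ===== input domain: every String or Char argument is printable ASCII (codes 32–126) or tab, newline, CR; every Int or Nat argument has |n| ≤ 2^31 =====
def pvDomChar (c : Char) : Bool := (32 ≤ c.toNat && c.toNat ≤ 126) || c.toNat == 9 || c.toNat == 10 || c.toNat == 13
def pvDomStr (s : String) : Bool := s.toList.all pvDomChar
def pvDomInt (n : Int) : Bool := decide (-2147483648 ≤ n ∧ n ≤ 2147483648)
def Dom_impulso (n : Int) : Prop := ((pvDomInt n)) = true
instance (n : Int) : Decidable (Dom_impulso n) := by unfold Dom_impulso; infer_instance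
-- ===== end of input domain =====

-- B replaces A's branching loop by allocating a zero list and setting the single center element (objective: simpler).

-- ===== PORT A =====
def impulso (n : Int) : List Int :=
  (PySem.List.pyRange (-n) (n + 1) 1).foldl
    (fun valores valor => valores ++ [if valor = 0 then (1 : Int) else 0]) []

-- ===== PORT B =====
def impulso_alt (n : Int) : List Int :=
  let valores := List.replicate (2 * n + 1).toNat (0 : Int)
  if valores = [] then valores else valores.set n.toNat 1

-- ===== PRECONDITION & SPEC =====
def Spec_impulso (n : Int) (out : List Int) : Prop := out = impulso_alt n
instance (n : Int) (out : List Int) : Decidable (Spec_impulso n out) := by unfold Spec_impulso; infer_instance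

-- ===== CLAIM (what is proved, stated in full; the proofs are below) =====
def Claim_equal_impulso : Prop := ∀ (n : Int), Dom_impulso n → Spec_impulso n (impulso n)

-- ===== LEMMAS AND PROOFS =====

theorem foldl_append_singleton (f : Int → Int) :
    ∀ (l : List Int) (init : List Int),
      l.foldl (fun acc v => acc ++ [f v]) init = init ++ l.map f := by
  intro l
  induction l with
  | nil => intro init; simp
  | cons x xs ih => intro init; simp [List.foldl, ih]

theorem impulso_eq_map (n : Int) :
    impulso n = (PySem.List.pyRange (-n) (n + 1) 1).map (fun v => if v = 0 then (1 : Int) else 0) := by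
  unfold impulso
  rw [foldl_append_singleton]
  simp

-- ===== VERDICT (by name: the statement is the Claim_ definition above) =====
theorem impulso_spec : Claim_equal_impulso := by
  intro n _
  unfold Spec_impulso
  rw [impulso_eq_map]
  by_cases h : n < 0
  · rw [PySem.List.pyRange_one_eq_nil (by omega)]
    have hz : (2 * n + 1).toNat = 0 := by omega
    simp [impulso_alt, hz]
  · push Not at h
    have hlen : (n + 1 - -n).toNat = (2 * n + 1).toNat := by omega
    have hne : List.replicate (2 * n + 1).toNat (0 : Int) ≠ [] := by
      simp [List.replicate_eq_nil_iff]
      omega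
    simp only [impulso_alt, if_neg hne]
    apply List.ext_getElem
    · simp [PySem.List.length_pyRange_one]
      omega
    · intro k hk1 hk2
      have hkn : k < (2 * n + 1).toNat := by
        simp [PySem.List.length_pyRange_one] at hk1
        omega
      rw [List.getElem_map, PySem.List.getElem_pyRange_one]
      rw [List.getElem_set]
      rw [List.getElem_replicate]
      split_ifs with h1 h2 h2 <;> omega
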